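-- pv_equiv track=rewrite | github.com/extremenetworks/ansible_collections.extreme.fe | ansible_collections/extreme/fe/tests/integration/harness/run_test.py | _has_unexpected_warning_error
-- ===== SOURCE A (Python) =====
-- IGNORED_WARNING_SUBSTRINGS = (
--     "WARNING:Disable ISIS will cause traffic disruption",
-- )
--
-- def _has_unexpected_warning_error(output: str) -> bool:
--     """Return True when output contains errors that weren't ignored."""
--
--     sanitized_output = output
--     for ignored_warning in IGNORED_WARNING_SUBSTRINGS:
--         if ignored_warning in sanitized_output:
--             sanitized_output = sanitized_output.replace(ignored_warning, "")
--
--     if "WARNING" in sanitized_output: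
--         return True
--
--     if "ERROR" not in sanitized_output:
--         return False
--
--     lines = sanitized_output.splitlines()
--     total_lines = len(lines)
--     index = 0
--     while index < total_lines:
--         line = lines[index]
--         stripped = line.strip()
--         contains_error = (
--             "ERROR" in line
--             or stripped.startswith("fatal:")
--             or stripped.startswith("ERROR!")
--         )
--         if contains_error:
--             ignoring = False
--             scan = index + 1
--             while scan < total_lines:
--                 current = lines[scan]
--                 current_stripped = current.strip()
--                 if "...ignoring" in current:
--                     ignoring = True
--                     index = scan
--                     break
--                 if current_stripped.startswith("TASK [") or current_stripped.startswith("PLAY "):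
--                     break
--                 if "ERROR" in current and scan != index:
--                     break
--                 scan += 1
--             if not ignoring:
--                 return True
--         index += 1
--     return False
-- ===== SOURCE B (Python) =====
-- IGNORED_WARNING_SUBSTRINGS = (
--     "WARNING:Disable ISIS will cause traffic disruption",
-- )
--
--
-- def _has_unexpected_warning_error(output: str) -> bool:
--     """Return True when output contains errors that weren't ignored."""
--
--     sanitized = output
--     for ignored_warning in IGNORED_WARNING_SUBSTRINGS:
--         if ignored_warning in sanitized:
--             sanitized = sanitized.replace(ignored_warning, "")
--
--     if "WARNING" in sanitized:
--         return True
--     if "ERROR" not in sanitized: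
--         return False
--
--     pending_error = False
--     for line in sanitized.splitlines():
--         stripped = line.strip()
--         if pending_error:
--             if "...ignoring" in line:
--                 pending_error = False
--             elif stripped.startswith("TASK [") or stripped.startswith("PLAY "):
--                 return True
--             elif "ERROR" in line:
--                 return True
--         elif ("ERROR" in line
--               or stripped.startswith("fatal:")
--               or stripped.startswith("ERROR!")):
--             pending_error = True
--     return pending_error
-- ===== Notes on version B (the rewrite author's own statement) =====
-- stated objective: simpler
-- what changed: Replaced A's nested while-loops with index jumps (an inner forward scan restarted after each error line) by a single linear pass over the lines carrying one boolean pending_error flag.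
import Mathlib
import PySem

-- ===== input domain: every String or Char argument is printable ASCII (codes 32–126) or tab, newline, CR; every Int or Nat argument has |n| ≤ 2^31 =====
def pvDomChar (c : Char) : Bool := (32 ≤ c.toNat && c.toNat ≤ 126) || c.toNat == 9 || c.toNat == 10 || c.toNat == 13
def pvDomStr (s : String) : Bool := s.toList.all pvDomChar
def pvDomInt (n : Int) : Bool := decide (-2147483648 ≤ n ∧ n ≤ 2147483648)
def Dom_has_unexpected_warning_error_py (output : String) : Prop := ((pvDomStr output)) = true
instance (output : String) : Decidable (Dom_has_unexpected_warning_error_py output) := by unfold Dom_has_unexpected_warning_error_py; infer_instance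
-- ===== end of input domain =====

-- B replaces A's nested while-loops (inner forward scan with index jumps) by one linear pass
-- carrying a single pending_error flag: simpler, same return value.

-- ===== PORT A =====
def IGNORED_WARNING_SUBSTRINGS : List String := ["WARNING:Disable ISIS will cause traffic disruption"]

-- inner `while scan < total_lines` loop of A: returns `some scan` when it breaks with
-- ignoring = True (then the outer loop resumes at scan + 1), `none` otherwise (return True)
def pvScanA (lines : List String) (total index scan : Nat) : Option Nat :=
  if h : scan < total then
    let current := lines.getD scan ""
    let current_stripped := PySem.Str.strip current
    if PySem.Str.isIn "...ignoring" current then some scan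
    else if PySem.Str.startswith current_stripped "TASK [" || PySem.Str.startswith current_stripped "PLAY " then none
    else if PySem.Str.isIn "ERROR" current && decide (scan ≠ index) then none
    else pvScanA lines total index (scan + 1)
  else none
termination_by total - scan
decreasing_by omega

-- needed by pvOuterA's termination: the break position of the inner loop is ≥ its start
theorem pvScanA_le (lines : List String) (total index : Nat) :
    ∀ scan j, pvScanA lines total index scan = some j → scan ≤ j := by
  intro scan
  fun_induction pvScanA lines total index scan with
  | case1 scan h hign => intro j hj; simp at hj; omega
  | case2 => intro j hj; simp at hj
  | case3 => intro j hj; simp at hj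
  | case4 scan h h1 h2 h3 h4 h5 IH => intro j hj; have := IH j hj; omega
  | case5 => intro j hj; simp at hj

-- outer `while index < total_lines` loop of A
def pvOuterA (lines : List String) (total index : Nat) : Bool :=
  if h : index < total then
    let line := lines.getD index ""
    let stripped := PySem.Str.strip line
    let contains_error := PySem.Str.isIn "ERROR" line
      || PySem.Str.startswith stripped "fatal:" || PySem.Str.startswith stripped "ERROR!"
    if contains_error then
      match hs : pvScanA lines total index (index + 1) with
      | some scan => pvOuterA lines total (scan + 1)
      | none => true
    else pvOuterA lines total (index + 1)
  else false
termination_by total - index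
decreasing_by
  · have := pvScanA_le lines total index (index + 1) _ hs; omega
  · omega

def has_unexpected_warning_error_py (output : String) : Bool :=
  let sanitized_output := IGNORED_WARNING_SUBSTRINGS.foldl
    (fun s w => if PySem.Str.isIn w s then PySem.Str.replace s w "" else s) output
  if PySem.Str.isIn "WARNING" sanitized_output then true
  else if !PySem.Str.isIn "ERROR" sanitized_output then false
  else
    let lines := PySem.Str.splitlines sanitized_output
    pvOuterA lines lines.length 0

-- ===== PORT B =====
-- single pass with a pending_error flag
def pvLoopB (lines : List String) (pending : Bool) : Bool :=
  match lines with
  | [] => pending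
  | line :: rest =>
    let stripped := PySem.Str.strip line
    if pending then
      if PySem.Str.isIn "...ignoring" line then pvLoopB rest false
      else if PySem.Str.startswith stripped "TASK [" || PySem.Str.startswith stripped "PLAY " then true
      else if PySem.Str.isIn "ERROR" line then true
      else pvLoopB rest true
    else if PySem.Str.isIn "ERROR" line
        || PySem.Str.startswith stripped "fatal:" || PySem.Str.startswith stripped "ERROR!" then
      pvLoopB rest true
    else pvLoopB rest false

def has_unexpected_warning_error_py_alt (output : String) : Bool :=
  let sanitized := IGNORED_WARNING_SUBSTRINGS.foldl
    (fun s w => if PySem.Str.isIn w s then PySem.Str.replace s w "" else s) output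
  if PySem.Str.isIn "WARNING" sanitized then true
  else if !PySem.Str.isIn "ERROR" sanitized then false
  else pvLoopB (PySem.Str.splitlines sanitized) false

-- ===== PRECONDITION & SPEC =====
def Spec_has_unexpected_warning_error_py (output : String) (out : Bool) : Prop := out = has_unexpected_warning_error_py_alt output
instance (output : String) (out : Bool) : Decidable (Spec_has_unexpected_warning_error_py output out) := by unfold Spec_has_unexpected_warning_error_py; infer_instance

-- ===== CLAIM (what is proved, stated in full; the proofs are below) =====
def Claim_equal_has_unexpected_warning_error_py : Prop := ∀ (output : String), Dom_has_unexpected_warning_error_py output → Spec_has_unexpected_warning_error_py output (has_unexpected_warning_error_py output)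

-- ===== LEMMAS AND PROOFS =====
theorem pvScan_eq (lines : List String) (index : Nat) :
    ∀ m scan, lines.length - scan ≤ m → index < scan →
    (∀ j, scan ≤ j → pvOuterA lines lines.length (j + 1) = pvLoopB (lines.drop (j + 1)) false) →
    (match pvScanA lines lines.length index scan with
     | some j => pvOuterA lines lines.length (j + 1)
     | none => true) = pvLoopB (lines.drop scan) true := by
  intro m
  induction m with
  | zero =>
    intro scan hm hlt hIH
    have hge : lines.length ≤ scan := by omega
    rw [pvScanA, dif_neg (by omega), List.drop_eq_nil_of_le hge]
    rfl
  | succ m IHm =>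
    intro scan hm hlt hIH
    by_cases h : scan < lines.length
    · have hdrop : lines.drop scan = lines[scan] :: lines.drop (scan + 1) := List.drop_eq_getElem_cons h
      have hget : lines.getD scan "" = lines[scan] := List.getD_eq_getElem lines "" h
      have hne : scan ≠ index := by omega
      rw [pvScanA, dif_pos h, hdrop]
      cases hign : PySem.Str.isIn "...ignoring" lines[scan] with
      | true =>
        simp only [pvLoopB, hget, hign, if_true]
        exact hIH scan le_rfl
      | false =>
        cases htp : (PySem.Str.startswith (PySem.Str.strip lines[scan]) "TASK [" || PySem.Str.startswith (PySem.Str.strip lines[scan]) "PLAY ") with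
        | true =>
          simp only [hget]
          simp at hign htp
          simp [pvLoopB, hign, htp]
        | false =>
          cases herr : PySem.Str.isIn "ERROR" lines[scan] with
          | true =>
            simp only [hget]
            simp at hign htp herr
            simp [pvLoopB, hign, htp, herr, hne]
          | false =>
            have hrec := IHm (scan + 1) (by omega) (by omega) (fun j hj => hIH j (by omega))
            simp only [hget]
            simp at hign htp herr
            simp only [pvLoopB]
            simp [hign, htp, herr]
            simpa using hrec
    · have hge : lines.length ≤ scan := by omega
      rw [pvScanA, dif_neg (by omega), List.drop_eq_nil_of_le hge]
      rfl

theorem pvOuter_eq (lines : List String) :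
    ∀ n index, lines.length - index ≤ n →
    pvOuterA lines lines.length index = pvLoopB (lines.drop index) false := by
  intro n
  induction n with
  | zero =>
    intro index hn
    rw [pvOuterA, dif_neg (by omega), List.drop_eq_nil_of_le (by omega)]
    rfl
  | succ n IHn =>
    intro index hn
    by_cases h : index < lines.length
    · have hdrop : lines.drop index = lines[index] :: lines.drop (index + 1) := List.drop_eq_getElem_cons h
      have hget : lines.getD index "" = lines[index] := List.getD_eq_getElem lines "" h
      rw [pvOuterA, dif_pos h, hdrop]
      cases hce : (PySem.Str.isIn "ERROR" lines[index]
          || PySem.Str.startswith (PySem.Str.strip lines[index]) "fatal:"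
          || PySem.Str.startswith (PySem.Str.strip lines[index]) "ERROR!") with
      | true =>
        have hscan := pvScan_eq lines index (lines.length - (index + 1)) (index + 1) le_rfl
          (by omega) (fun j hj => IHn (j + 1) (by omega))
        simp only [hget, pvLoopB, hce]
        cases hsc : pvScanA lines lines.length index (index + 1) with
        | some scanv =>
          rw [hsc] at hscan
          simpa using hscan
        | none =>
          rw [hsc] at hscan
          simpa using hscan
      | false =>
        have hrec := IHn (index + 1) (by omega)
        simp only [hget, pvLoopB, hce]
        simp at hce
        simp
        simpa using hrec
    · rw [pvOuterA, dif_neg (by omega), List.drop_eq_nil_of_le (by omega)]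
      rfl

-- ===== VERDICT (by name: the statement is the Claim_ definition above) =====
theorem has_unexpected_warning_error_py_spec : Claim_equal_has_unexpected_warning_error_py := by
  intro output _
  have key : ∀ (ls : List String), pvOuterA ls ls.length 0 = pvLoopB ls false := fun ls => by
    simpa using pvOuter_eq ls ls.length 0 le_rfl
  unfold Spec_has_unexpected_warning_error_py has_unexpected_warning_error_py has_unexpected_warning_error_py_alt
  simp only [key]
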